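-- pv_equiv track=rewrite | github.com/PDFBench/PDFBench | src/utils/folding.py | clean_seq
-- ===== SOURCE A (Python) =====
-- def clean_seq(sequence: str) -> str:
--     replacement_map = {
--         "B": "N",  # Aspartic acid or Asparagine -> Asparagine
--         "Z": "Q",  # Glutamic acid or Glutamine -> Glutamine
--         "J": "L",  # Leucine or Isoleucine -> Leucine
--         "U": "C",  # Selenocysteine -> Cysteine
--         "O": "K",  # Pyrrolysine -> Lysine
--         "X": "G",  # Unknown -> Glycine
--         "-": "",  # Gap -> Remove
--         "*": "",  # Stop codon -> Remove
--         "?": "G",  # Unknown -> Glycine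
--         "~": "G",  # Unresolved -> Glycine
--         ".": "",  # Gap -> Remove
--     }
--
--     # 将序列转换为大写，并处理小写字母（先转换再替换）
--     cleaned_seq = sequence.upper()
--
--     # 进行替换
--     for non_std, replacement in replacement_map.items():
--         cleaned_seq = cleaned_seq.replace(non_std, replacement)
--
--     return cleaned_seq
-- ===== SOURCE B (Python) =====
-- def clean_seq(sequence: str) -> str:
--     replacement_map = {
--         "B": "N",
--         "Z": "Q",
--         "J": "L",
--         "U": "C",
--         "O": "K",
--         "X": "G",
--         "-": "",
--         "*": "",
--         "?": "G",
--         "~": "G",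
--         ".": "",
--     }
--     return "".join(replacement_map.get(c, c) for c in sequence.upper())
-- ===== Notes on version B (the rewrite author's own statement) =====
-- stated objective: idiomatic
-- what changed: Replaces eleven sequential full-string str.replace passes with a single character-level pass that looks each uppercased character up in the replacement map and joins the pieces.
import Mathlib
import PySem

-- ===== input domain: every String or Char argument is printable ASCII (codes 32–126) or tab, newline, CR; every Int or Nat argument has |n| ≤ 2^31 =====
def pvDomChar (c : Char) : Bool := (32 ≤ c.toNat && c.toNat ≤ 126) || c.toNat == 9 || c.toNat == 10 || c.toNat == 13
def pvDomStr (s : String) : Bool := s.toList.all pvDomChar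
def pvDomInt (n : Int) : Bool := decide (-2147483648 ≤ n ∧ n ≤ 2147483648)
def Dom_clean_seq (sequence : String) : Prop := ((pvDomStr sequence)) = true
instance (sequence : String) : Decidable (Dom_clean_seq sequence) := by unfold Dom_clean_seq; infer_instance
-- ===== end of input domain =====

-- B replaces A's eleven sequential full-string replace passes with one character-level
-- lookup-and-join pass over the uppercased string (objective: idiomatic single pass).

-- ===== PORT A =====
-- the literal replacement dict of A, in insertion order; A folds str.replace over its items
def pvRepItems : List (String × String) :=
  [("B", "N"), ("Z", "Q"), ("J", "L"), ("U", "C"), ("O", "K"), ("X", "G"),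
   ("-", ""), ("*", ""), ("?", "G"), ("~", "G"), (".", "")]

def clean_seq (sequence : String) : String :=
  pvRepItems.foldl (fun acc p => PySem.Str.replace acc p.1 p.2) (PySem.Str.upper sequence)

-- ===== PORT B =====
def pvBMap : PySem.Dict Char String :=
  PySem.Dict.ofList
    [('B', "N"), ('Z', "Q"), ('J', "L"), ('U', "C"), ('O', "K"), ('X', "G"),
     ('-', ""), ('*', ""), ('?', "G"), ('~', "G"), ('.', "")]

def clean_seq_alt (sequence : String) : String :=
  PySem.Str.join ""
    ((PySem.Str.upper sequence).toList.map (fun c => pvBMap.getD c (String.ofList [c])))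

-- ===== PRECONDITION & SPEC =====
def Spec_clean_seq (sequence : String) (out : String) : Prop := out = clean_seq_alt sequence
instance (sequence : String) (out : String) : Decidable (Spec_clean_seq sequence out) := by unfold Spec_clean_seq; infer_instance

-- ===== CLAIM (what is proved, stated in full; the proofs are below) =====
def Claim_equal_clean_seq : Prop := ∀ (sequence : String), Dom_clean_seq sequence → Spec_clean_seq sequence (clean_seq sequence)

-- ===== LEMMAS AND PROOFS =====

-- Chars.replace with a single-char pattern is a flatMap (inner loop of A's replace)
theorem pv_go_single (c : Char) (rep : List Char) :
    ∀ (l acc : List Char),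
      PySem.Chars.replace.go [c] rep l.length l acc
        = acc.reverse ++ l.flatMap (fun x => if x = c then rep else [x]) := by
  intro l
  induction l with
  | nil => intro acc; simp [PySem.Chars.replace.go]
  | cons x t ih =>
    intro acc
    by_cases h : x = c
    · subst h
      simp [PySem.Chars.replace.go, List.isPrefixOf, ih]
    · simp [PySem.Chars.replace.go, List.isPrefixOf, h, Ne.symm h, ih]

theorem pv_repl_single (c : Char) (rep l : List Char) :
    PySem.Chars.replace l [c] rep = l.flatMap (fun x => if x = c then rep else [x]) := by
  simp [PySem.Chars.replace, pv_go_single]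

-- empty-separator join is flatten
theorem pv_join_nil (ps : List (List Char)) : PySem.Chars.join [] ps = ps.flatten := by
  induction ps with
  | nil => rfl
  | cons a t ih =>
    cases t with
    | nil => simp [PySem.Chars.join, List.intercalate]
    | cons b u =>
      simp only [PySem.Chars.join, List.intercalate] at *
      simp [List.intersperse, ih]

-- ===== VERDICT (by name: the statement is the Claim_ definition above) =====
set_option maxHeartbeats 800000 in
theorem clean_seq_spec : Claim_equal_clean_seq := by
  intro s _
  unfold Spec_clean_seq clean_seq clean_seq_alt pvRepItems
  apply String.toList_inj.mp
  simp only [List.foldl_cons, List.foldl_nil, PySem.Str.toList_replace, PySem.Str.toList_join,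
    List.map_map]
  rw [show ("B" : String).toList = ['B'] from rfl, show ("N" : String).toList = ['N'] from rfl,
     show ("Z" : String).toList = ['Z'] from rfl, show ("Q" : String).toList = ['Q'] from rfl,
     show ("J" : String).toList = ['J'] from rfl, show ("L" : String).toList = ['L'] from rfl,
     show ("U" : String).toList = ['U'] from rfl, show ("C" : String).toList = ['C'] from rfl,
     show ("O" : String).toList = ['O'] from rfl, show ("K" : String).toList = ['K'] from rfl,
     show ("X" : String).toList = ['X'] from rfl, show ("G" : String).toList = ['G'] from rfl,
     show ("-" : String).toList = ['-'] from rfl, show ("*" : String).toList = ['*'] from rfl,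
     show ("?" : String).toList = ['?'] from rfl, show ("~" : String).toList = ['~'] from rfl,
     show ("." : String).toList = ['.'] from rfl, show ("" : String).toList = [] from rfl]
  simp only [pv_repl_single, List.flatMap_assoc, pv_join_nil, ← List.flatMap_def]
  apply List.flatMap_congr
  intro c _
  by_cases h1 : c = 'B'; · subst h1; decide
  by_cases h2 : c = 'Z'; · subst h2; decide
  by_cases h3 : c = 'J'; · subst h3; decide
  by_cases h4 : c = 'U'; · subst h4; decide
  by_cases h5 : c = 'O'; · subst h5; decide
  by_cases h6 : c = 'X'; · subst h6; decide
  by_cases h7 : c = '-'; · subst h7; decide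
  by_cases h8 : c = '*'; · subst h8; decide
  by_cases h9 : c = '?'; · subst h9; decide
  by_cases h10 : c = '~'; · subst h10; decide
  by_cases h11 : c = '.'; · subst h11; decide
  rw [show pvBMap = PySem.Dict.mk
        [('B', "N"), ('Z', "Q"), ('J', "L"), ('U', "C"), ('O', "K"), ('X', "G"),
         ('-', ""), ('*', ""), ('?', "G"), ('~', "G"), ('.', "")] from by decide]
  simp [PySem.Dict.getD, PySem.Dict.get?, beq_iff_eq,
        h1, h2, h3, h4, h5, h6, h7, h8, h9, h10, h11,
        Ne.symm h1, Ne.symm h2, Ne.symm h3, Ne.symm h4, Ne.symm h5, Ne.symm h6,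
        Ne.symm h7, Ne.symm h8, Ne.symm h9, Ne.symm h10, Ne.symm h11]
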